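-- pv_equiv track=rewrite | github.com/haolunc/ARC-RL | reference_solutions/solutions/23581191.py | transform
-- ===== SOURCE A (Python) =====
-- def transform(grid):
--
--     h = len(grid)
--     w = len(grid[0]) if h else 0
--
--     points = []
--     for r in range(h):
--         for c in range(w):
--             val = grid[r][c]
--             if val != 0:
--                 points.append((r, c, val))
--
--     out = [[0] * w for _ in range(h)]
--     for r in range(h):
--         for c in range(w):
--             covering = set()
--             for pr, pc, col in points:
--                 if r == pr or c == pc:
--                     covering.add(col)
--             if len(covering) == 0:
--                 out[r][c] = 0
--             elif len(covering) == 1: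
--                 out[r][c] = covering.pop()
--             else:
--                 out[r][c] = 2
--     return out
-- ===== SOURCE B (Python) =====
-- def transform(grid):
--     h = len(grid)
--     w = len(grid[0]) if h else 0
--     row_colors = [{v for v in row[:w] if v != 0} for row in grid]
--     col_colors = [{row[c] for row in grid if row[c] != 0} for c in range(w)]
--     out = []
--     for r in range(h):
--         row_out = []
--         for c in range(w):
--             s = row_colors[r] | col_colors[c]
--             if len(s) == 0:
--                 row_out.append(0)
--             elif len(s) == 1:
--                 row_out.append(next(iter(s)))
--             else:
--                 row_out.append(2)
--         out.append(row_out)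
--     return out
-- ===== Notes on version B (the rewrite author's own statement) =====
-- stated objective: faster
-- what changed: Instead of scanning the full list of nonzero points once per cell (A), B precomputes one colour set per row and per column in a single pass and takes the union of rowset[r] and colset[c] per cell.
import Mathlib
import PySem

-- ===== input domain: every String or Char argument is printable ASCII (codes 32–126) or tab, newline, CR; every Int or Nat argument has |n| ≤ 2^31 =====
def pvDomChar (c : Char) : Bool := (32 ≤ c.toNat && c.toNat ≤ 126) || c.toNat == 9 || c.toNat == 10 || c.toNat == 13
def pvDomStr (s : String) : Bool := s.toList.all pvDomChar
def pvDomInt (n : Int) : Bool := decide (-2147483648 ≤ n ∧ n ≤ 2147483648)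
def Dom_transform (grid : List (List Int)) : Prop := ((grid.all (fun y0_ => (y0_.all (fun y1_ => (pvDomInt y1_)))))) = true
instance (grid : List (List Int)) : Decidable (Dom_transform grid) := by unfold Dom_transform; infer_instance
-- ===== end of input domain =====

-- B precomputes per-row and per-column colour sets once and takes their union per cell,
-- replacing A's per-cell scan over all points (objective: faster, asymptotic).


-- ===== PORT A =====
-- literal port of A: collect all nonzero points, then for each cell scan every point
-- sharing its row or column, collecting the colours in a set.
def transform (grid : List (List Int)) : List (List Int) :=
  let h := grid.length
  let w := if h ≠ 0 then (grid.headD []).length else 0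
  let points : List (Nat × Nat × Int) :=
    (List.range h).foldl (fun acc r =>
      (List.range w).foldl (fun acc c =>
        let val := (grid.getD r []).getD c 0
        if val != 0 then acc ++ [(r, c, val)] else acc) acc) []
  (List.range h).map (fun r =>
    (List.range w).map (fun c =>
      let covering : PySem.Set Int :=
        points.foldl (fun s p =>
          if r = p.1 ∨ c = p.2.1 then PySem.Set.add s p.2.2 else s) PySem.Set.empty
      if covering.length = 0 then 0
      else if covering.length = 1 then covering.headD 0  -- pop() of a singleton set
      else 2))

-- ===== PORT B =====
-- literal port of B: per-row and per-column colour sets built once, union per cell.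
def transform_alt (grid : List (List Int)) : List (List Int) :=
  let h := grid.length
  let w := if h ≠ 0 then (grid.headD []).length else 0
  let rowColors : List (PySem.Set Int) :=
    grid.map (fun row => PySem.Set.ofList ((row.take w).filter (fun v => v != 0)))  -- row[:w] = take w (w ≥ 0)
  let colColors : List (PySem.Set Int) :=
    (List.range w).map (fun c =>
      PySem.Set.ofList ((grid.map (fun row => row.getD c 0)).filter (fun v => v != 0)))
  (List.range h).map (fun r =>
    (List.range w).map (fun c =>
      let s := PySem.Set.union (rowColors.getD r PySem.Set.empty) (colColors.getD c PySem.Set.empty)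
      if s.length = 0 then 0
      else if s.length = 1 then s.headD 0  -- next(iter(s)) of a singleton set
      else 2))

-- ===== PRECONDITION & SPEC =====
-- Pre_ excludes ragged grids with a row SHORTER than the first row, on which A raises IndexError.
def Pre_transform (grid : List (List Int)) : Prop :=
  ∀ row ∈ grid, (grid.headD []).length ≤ row.length
instance (grid : List (List Int)) : Decidable (Pre_transform grid) := by unfold Pre_transform; infer_instance

def pvWitness_transform : List (List Int) := [[1, 0, 0], [0, 0, 3], [0, 0, 0]]

def Spec_transform (grid : List (List Int)) (out : List (List Int)) : Prop := out = transform_alt grid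
instance (grid : List (List Int)) (out : List (List Int)) : Decidable (Spec_transform grid out) := by unfold Spec_transform; infer_instance

-- ===== CLAIM (what is proved, stated in full; the proofs are below) =====
def Claim_equal_transform : Prop := ∀ (grid : List (List Int)), Dom_transform grid → Pre_transform grid → Spec_transform grid (transform grid)

-- ===== LEMMAS AND PROOFS =====

-- loop 'for x in l: if p(x): s.add(f(x))' : membership of the resulting set
theorem mem_foldl_ite_add {α β : Type} [BEq β] [LawfulBEq β] (l : List α) (P : α → Prop)
    [DecidablePred P] (f : α → β) (s : PySem.Set β) (x : β) :
    x ∈ l.foldl (fun s y => if P y then PySem.Set.add s (f y) else s) s ↔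
      x ∈ s ∨ ∃ y ∈ l, P y ∧ f y = x := by
  induction l generalizing s with
  | nil => simp
  | cons a l ih =>
    simp only [List.foldl_cons, ih, List.mem_cons]
    by_cases hp : P a
    · simp only [hp, if_pos, PySem.Set.mem_add]
      constructor
      · rintro ((hx | rfl) | ⟨y, hy, hPy, rfl⟩)
        · exact Or.inl hx
        · exact Or.inr ⟨a, Or.inl rfl, hp, rfl⟩
        · exact Or.inr ⟨y, Or.inr hy, hPy, rfl⟩
      · rintro (hx | ⟨y, (rfl | hy), hPy, rfl⟩)
        · exact Or.inl (Or.inl hx)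
        · exact Or.inl (Or.inr rfl)
        · exact Or.inr ⟨y, hy, hPy, rfl⟩
    · simp only [hp, if_neg, not_false_iff]
      constructor
      · rintro (hx | ⟨y, hy, hPy, rfl⟩)
        · exact Or.inl hx
        · exact Or.inr ⟨y, Or.inr hy, hPy, rfl⟩
      · rintro (hx | ⟨y, (rfl | hy), hPy, rfl⟩)
        · exact Or.inl hx
        · exact absurd hPy hp
        · exact Or.inr ⟨y, hy, hPy, rfl⟩

-- the same loop preserves the set invariant (no duplicates)
theorem nodup_foldl_ite_add {α β : Type} [BEq β] [LawfulBEq β] (l : List α) (P : α → Prop)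
    [DecidablePred P] (f : α → β) (s : PySem.Set β) (hs : s.Nodup) :
    (l.foldl (fun s y => if P y then PySem.Set.add s (f y) else s) s).Nodup := by
  induction l generalizing s with
  | nil => exact hs
  | cons a l ih =>
    simp only [List.foldl_cons]
    by_cases hp : P a
    · simp only [hp, if_pos]
      exact ih _ (PySem.Set.nodup_add s (f a) hs)
    · simpa [hp] using ih _ hs

-- two duplicate-free sets with the same members give the same cell value
theorem cellVal_eq_of_mem_iff (S T : List Int) (hS : S.Nodup) (hT : T.Nodup)
    (h : ∀ x, x ∈ S ↔ x ∈ T) :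
    (if S.length = 0 then (0:Int) else if S.length = 1 then S.headD 0 else 2) =
    (if T.length = 0 then (0:Int) else if T.length = 1 then T.headD 0 else 2) := by
  have hperm : S.Perm T := (List.perm_ext_iff_of_nodup hS hT).2 h
  have hlen : S.length = T.length := hperm.length_eq
  rw [hlen]
  split_ifs with h0 h1
  · rfl
  · obtain ⟨a, rfl⟩ : ∃ a, S = [a] := List.length_eq_one_iff.mp (hlen.trans h1)
    obtain ⟨b, rfl⟩ : ∃ b, T = [b] := List.length_eq_one_iff.mp h1
    have : a = b := by simpa using (h a).1 (by simp)
    simp [this]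
  · rfl

-- ===== VERDICT (by name: the statement is the Claim_ definition above) =====
theorem transform_spec : Claim_equal_transform := by
  intro grid _ hpre
  unfold Pre_transform at hpre
  unfold Spec_transform transform transform_alt
  simp only [PySem.List.foldl_append_if, PySem.List.foldl_append_eq_flatMap, List.nil_append]
  refine List.map_congr_left fun r hr => ?_
  refine List.map_congr_left fun c hc => ?_
  rw [List.mem_range] at hr hc
  have hne : grid.length ≠ 0 := by omega
  rw [if_pos hne] at hc ⊢
  rw [List.getD_eq_getElem _ _ (by simpa using hr), List.getD_eq_getElem _ _ (by simpa using hc),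
      List.getElem_map, List.getElem_map, List.getElem_range]
  refine cellVal_eq_of_mem_iff _ _ ?_ ?_ ?_
  · exact nodup_foldl_ite_add _ _ _ _ List.nodup_nil
  · exact PySem.Set.nodup_union _ _ (PySem.Set.nodup_ofList _)
  · intro x
    rw [mem_foldl_ite_add]
    simp only [PySem.Set.mem_union, PySem.Set.mem_ofList, List.mem_filter, List.mem_map,
      List.mem_flatMap, List.mem_range, bne_iff_ne, ne_eq]
    constructor
    · rintro (hempty | ⟨y, ⟨pr, hpr, pc, ⟨hpc, hval⟩, rfl⟩, hcond, hx⟩)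
      · simp [PySem.Set.empty] at hempty
      · have hrowmem : grid[pr] ∈ grid := List.getElem_mem hpr
        have hlen : (grid.headD []).length ≤ grid[pr].length := hpre _ hrowmem
        have hgetrow : grid.getD pr [] = grid[pr] := List.getD_eq_getElem _ _ hpr
        have hpclen : pc < grid[pr].length := lt_of_lt_of_le hpc hlen
        have hvx : grid[pr][pc] = x := by
          rw [hgetrow] at hx; rwa [List.getD_eq_getElem _ _ hpclen] at hx
        have hvne : ¬ x = 0 := by
          rw [hgetrow, List.getD_eq_getElem _ _ hpclen] at hval; rw [← hvx]; exact hval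
        rcases hcond with rfl | rfl
        · left
          refine ⟨?_, hvne⟩
          rw [List.mem_iff_getElem]
          refine ⟨pc, ?_, ?_⟩
          · rw [List.length_take]; exact lt_min hpc hpclen
          · rw [List.getElem_take]; exact hvx
        · right
          refine ⟨⟨grid[pr], hrowmem, ?_⟩, hvne⟩
          rw [List.getD_eq_getElem _ _ hpclen]; exact hvx
    · rintro (⟨htake, hx0⟩ | ⟨⟨row, hrow, hval⟩, hx0⟩)
      · obtain ⟨i, hi, hxi⟩ := List.mem_iff_getElem.mp htake
        have hiW : i < (grid.headD []).length := by
          rw [List.length_take] at hi; omega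
        have hilen : i < grid[r].length := by
          rw [List.length_take] at hi; omega
        rw [List.getElem_take] at hxi
        have hgetrow : grid.getD r [] = grid[r] := List.getD_eq_getElem _ _ hr
        have hvali : (grid.getD r []).getD i 0 = x := by
          rw [hgetrow, List.getD_eq_getElem _ _ hilen]; exact hxi
        refine Or.inr ⟨(r, i, (grid.getD r []).getD i 0), ⟨r, hr, i, ⟨hiW, ?_⟩, rfl⟩, Or.inl rfl, hvali⟩
        rw [hvali]; exact hx0
      · obtain ⟨pr, hpr, rfl⟩ := List.mem_iff_getElem.mp hrow
        have hlen : (grid.headD []).length ≤ grid[pr].length := hpre _ (List.getElem_mem hpr)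
        have hgetrow : grid.getD pr [] = grid[pr] := List.getD_eq_getElem _ _ hpr
        have hvali : (grid.getD pr []).getD c 0 = x := by rw [hgetrow]; exact hval
        refine Or.inr ⟨(pr, c, (grid.getD pr []).getD c 0), ⟨pr, hpr, c, ⟨hc, ?_⟩, rfl⟩, Or.inr rfl, hvali⟩
        rw [hvali]; exact hx0
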